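-- pv_equiv track=rewrite | github.com/FreddyPashley/Radar-Simulator | v1/main.py | plotCTA
-- ===== SOURCE A (Python) =====
-- SCALE_FACTOR = 12  # SFpx = 1nm (higher SF = more zoom)
--
-- def nm2px(nm):
--     """Converts nautical miles into pixels based on scale factor."""
--     return nm * SCALE_FACTOR
--
-- def plotCTA(x, y, points):
--     """Uses the coordinate points from the defined CTA (list[tuple]) to draw lines between for plotting later."""
--     points = points.copy()  # Otherwise, overwrites existing cta boundary
--     if points[-1] != points[0]:
--         points.append(points[0])
--     for i, point in enumerate(points):
--         p1, p2 = point
--         points[i] = (nm2px(p1), nm2px(p2))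
--     lines = []
--     for p in range(len(points)):
--         try:
--             p1, p2 = points[p], points[p+1]
--             z = [*p1, *p2]
--             for zz in range(len(z)):  # Clunky variable names, yes, I know...
--                 if zz % 2 == 0:
--                     z[zz] = z[zz]+y
--                 else:
--                     z[zz] = z[zz]+x
--             lines.append(z)
--         except IndexError:
--             break
--         except Exception as err:
--             raise err
--     return lines
-- ===== SOURCE B (Python) =====
-- SCALE_FACTOR = 12  # SFpx = 1nm (higher SF = more zoom)
--
-- def nm2px(nm):
--     """Converts nautical miles into pixels based on scale factor."""
--     return nm * SCALE_FACTOR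
--
-- def plotCTA(x, y, points):
--     """Uses the coordinate points from the defined CTA (list[tuple]) to draw lines between for plotting later."""
--     first = points[0]  # empty CTA raises IndexError, as with points[-1]
--
--     def seg(a, b):
--         return [nm2px(a[0]) + y, nm2px(a[1]) + x, nm2px(b[0]) + y, nm2px(b[1]) + x]
--
--     def go(prev, rest):
--         # recursion on the remaining points; closes the ring at the end if needed
--         if not rest:
--             return [seg(prev, first)] if prev != first else []
--         return [seg(prev, rest[0])] + go(rest[0], rest[1:])
--
--     return go(first, points[1:])
-- ===== Notes on version B (the rewrite author's own statement) =====
-- stated objective: simpler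
-- what changed: Instead of A's copy-and-close-the-ring list, an in-place scaling pass, and a try/except-IndexError index loop, B is a single structural recursion over the original points carrying (prev, rest) that emits each segment directly and appends the closing segment conditionally at the end; no closed list is built and no list is mutated.
import Mathlib
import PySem

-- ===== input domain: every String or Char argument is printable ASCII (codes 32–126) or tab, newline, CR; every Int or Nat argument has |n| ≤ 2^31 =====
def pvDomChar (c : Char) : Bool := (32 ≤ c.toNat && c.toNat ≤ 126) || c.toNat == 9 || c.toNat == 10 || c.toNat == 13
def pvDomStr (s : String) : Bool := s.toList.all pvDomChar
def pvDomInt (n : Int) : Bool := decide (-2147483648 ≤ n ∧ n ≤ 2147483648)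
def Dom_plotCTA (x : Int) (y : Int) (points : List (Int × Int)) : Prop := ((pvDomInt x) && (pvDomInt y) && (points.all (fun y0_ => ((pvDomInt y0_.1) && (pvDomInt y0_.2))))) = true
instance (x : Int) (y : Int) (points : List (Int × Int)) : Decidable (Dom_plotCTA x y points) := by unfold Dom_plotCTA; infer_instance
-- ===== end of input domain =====

-- B replaces A's build-closed-ring-list + pre-scaling pass + try/except index loop by a
-- structural recursion over the point list that emits each segment directly and closes
-- the ring conditionally at the end — simpler decomposition, same cost, no mutation.

-- ===== PORT A =====
def nm2px (nm : Int) : Int := nm * 12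

-- 'for p in range(len(points)): try points[p], points[p+1] … except IndexError: break'
def plotCTA_loop (x : Int) (y : Int) (pts : List (Int × Int)) (p : Nat) (acc : List (List Int)) : List (List Int) :=
  if p < pts.length then
    match PySem.List.pyGet? pts (p : Int), PySem.List.pyGet? pts ((p : Int) + 1) with
    | some p1, some p2 =>
        -- z = [*p1, *p2]; even indices += y, odd indices += x
        plotCTA_loop x y pts (p + 1) (acc ++ [[p1.1 + y, p1.2 + x, p2.1 + y, p2.2 + x]])
    | _, _ => acc
  else acc
termination_by pts.length - p

def plotCTA (x : Int) (y : Int) (points : List (Int × Int)) : List (List Int) :=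
  -- points[-1] / points[0] raise on []; Pre_ excludes that input
  match PySem.List.pyGet? points (-1), PySem.List.pyGet? points 0 with
  | some last, some first =>
      let pts := if last ≠ first then points ++ [first] else points
      let pts := pts.map (fun p => (nm2px p.1, nm2px p.2))
      plotCTA_loop x y pts 0 []
  | _, _ => []

-- ===== PORT B =====
def segB (x : Int) (y : Int) (a b : Int × Int) : List Int :=
  [nm2px a.1 + y, nm2px a.2 + x, nm2px b.1 + y, nm2px b.2 + x]

def plotCTA_go (x : Int) (y : Int) (first : Int × Int) (prev : Int × Int) : List (Int × Int) → List (List Int)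
  | [] => if prev ≠ first then [segB x y prev first] else []
  | c :: rest => [segB x y prev c] ++ plotCTA_go x y first c rest

def plotCTA_alt (x : Int) (y : Int) (points : List (Int × Int)) : List (List Int) :=
  match points with
  | [] => []          -- B raises IndexError here (points[0]); outside Pre_
  | first :: rest => plotCTA_go x y first first rest

-- ===== PRECONDITION & SPEC =====
-- Both A (points[-1]) and B (points[0]) raise IndexError on the empty list.
def Pre_plotCTA (x : Int) (y : Int) (points : List (Int × Int)) : Prop := points ≠ []
instance (x : Int) (y : Int) (points : List (Int × Int)) : Decidable (Pre_plotCTA x y points) := by unfold Pre_plotCTA; infer_instance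
def pvWitness_plotCTA : Int × Int × (List (Int × Int)) := (2, 3, [(1, 2), (3, 4)])

def Spec_plotCTA (x : Int) (y : Int) (points : List (Int × Int)) (out : List (List Int)) : Prop := out = plotCTA_alt x y points
instance (x : Int) (y : Int) (points : List (Int × Int)) (out : List (List Int)) : Decidable (Spec_plotCTA x y points out) := by unfold Spec_plotCTA; infer_instance

-- ===== CLAIM (what is proved, stated in full; the proofs are below) =====
def Claim_equal_plotCTA : Prop := ∀ (x : Int) (y : Int) (points : List (Int × Int)), Dom_plotCTA x y points → Pre_plotCTA x y points → Spec_plotCTA x y points (plotCTA x y points)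

-- ===== LEMMAS AND PROOFS =====

-- A's index loop produces exactly the consecutive-pair map over the suffix from p
lemma plotCTA_loop_eq (x y : Int) (pts : List (Int × Int)) (p : Nat) (acc : List (List Int)) :
    plotCTA_loop x y pts p acc =
      acc ++ ((pts.drop p).zip (pts.drop p).tail).map (fun q =>
        [q.1.1 + y, q.1.2 + x, q.2.1 + y, q.2.2 + x]) := by
  by_cases h : p < pts.length
  · rw [plotCTA_loop]
    simp only [h, if_true]
    have hget : PySem.List.pyGet? pts (p : Int) = some pts[p] := by
      rw [PySem.List.pyGet?_natCast, List.getElem?_eq_getElem h]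
    have hcast : ((p : Int) + 1) = ((p + 1 : Nat) : Int) := by push_cast; ring
    by_cases h2 : p + 1 < pts.length
    · have hget2 : PySem.List.pyGet? pts ((p : Int) + 1) = some pts[p+1] := by
        rw [hcast, PySem.List.pyGet?_natCast, List.getElem?_eq_getElem h2]
      rw [hget, hget2]
      dsimp only
      rw [plotCTA_loop_eq x y pts (p + 1)]
      have hd : pts.drop p = pts[p] :: pts.drop (p + 1) := List.drop_eq_getElem_cons h
      have hd2 : pts.drop (p + 1) = pts[p+1] :: pts.drop (p + 1 + 1) := List.drop_eq_getElem_cons h2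
      rw [hd, hd2]
      simp only [List.tail_cons, List.zip_cons_cons, List.map_cons, List.append_assoc,
        List.cons_append, List.nil_append]
    · have hget2 : PySem.List.pyGet? pts ((p : Int) + 1) = none := by
        rw [hcast, PySem.List.pyGet?_natCast, List.getElem?_eq_none]
        omega
      rw [hget, hget2]
      dsimp only
      have hd : pts.drop p = pts[p] :: pts.drop (p + 1) := List.drop_eq_getElem_cons h
      have hd2 : pts.drop (p + 1) = [] := List.drop_eq_nil_of_le (by omega)
      rw [hd, hd2]
      simp [List.zip]
  · have hd : pts.drop p = [] := List.drop_eq_nil_of_le (by omega)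
    rw [plotCTA_loop]
    simp [h, hd]
termination_by pts.length - p

-- zip of consecutive pairs commutes with mapping the scaling over the list
lemma zip_tail_map {α β : Type} (f : α → β) (l : List α) :
    ((l.map f).zip (l.map f).tail) = (l.zip l.tail).map (Prod.map f f) := by
  rw [← List.map_tail, List.zip_map]

-- B's recursion equals the consecutive-pair map over the conditionally closed ring
lemma plotCTA_go_eq (x y : Int) (first : Int × Int) :
    ∀ (rest : List (Int × Int)) (prev : Int × Int),
    plotCTA_go x y first prev rest =
      (((prev :: rest ++ (if rest.getLastD prev ≠ first then [first] else [])).zip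
        (prev :: rest ++ (if rest.getLastD prev ≠ first then [first] else [])).tail).map
          (fun q => segB x y q.1 q.2)) := by
  intro rest
  induction rest with
  | nil =>
    intro prev
    by_cases h : prev ≠ first <;> simp [plotCTA_go, h]
  | cons c r ih =>
    intro prev
    simp only [plotCTA_go, List.getLastD_cons, ih c, List.cons_append, List.tail_cons,
      List.zip_cons_cons, List.map_cons, List.nil_append]

-- ===== VERDICT (by name: the statement is the Claim_ definition above) =====
theorem plotCTA_spec : Claim_equal_plotCTA := by
  intro x y points _ hpre
  unfold Spec_plotCTA plotCTA plotCTA_alt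
  match points, hpre with
  | first :: rest, _ =>
    have hlast : PySem.List.pyGet? (first :: rest) (-1) = some (rest.getLastD first) := by
      simp [PySem.List.pyGet?_neg_one, List.getLast?_cons, List.getLastD_eq_getLast?]
    have hfirst : PySem.List.pyGet? (first :: rest) 0 = some first := by
      simp [PySem.List.pyGet?, PySem.List.pyIdx?]
    rw [hlast, hfirst]
    dsimp only
    rw [plotCTA_loop_eq, List.drop_zero, zip_tail_map, plotCTA_go_eq]
    by_cases h : rest.getLast?.getD first = first <;>
      simp [h, List.map_map, Function.comp_def, Prod.map, nm2px, segB]
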